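-- pv_equiv track=rewrite | github.com/manishhiroo/catalog-dashboard | design_helpers.py | search_suggestions
-- ===== SOURCE A (Python) =====
-- SEARCH_INDEX = [
--     {"type": "metric", "label": "Image Health", "target": "Image Health", "icon": "📷"},
--     {"type": "metric", "label": "ERP Assortment (BAU)", "target": "ERP Assortment (BAU)", "icon": "📊"},
--     {"type": "metric", "label": "ERP Assortment (Events)", "target": "ERP Assortment (Events)", "icon": "📅"},
--     {"type": "metric", "label": "Enabled Items Health", "target": "Enabled Items Health", "icon": "✅"},
--     {"type": "metric", "label": "Shelf Life Deviation", "target": "Shelf Life Deviation", "icon": "⏰"},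
--     {"type": "metric", "label": "SPIN Lookup", "target": "SPIN Lookup", "icon": "🔍"},
--     {"type": "metric", "label": "Upload Preview", "target": "Upload Preview", "icon": "⬆"},
--     {"type": "metric", "label": "QC: Diff Assortment", "target": "QC: Diff Assortment", "icon": "✓"},
--     # Image Health tabs
--     {"type": "tab", "parent": "Image Health", "label": "Health Trends", "target": "Image Health"},
--     {"type": "tab", "parent": "Image Health", "label": "Coverage", "target": "Image Health"},
--     {"type": "tab", "parent": "Image Health", "label": "Onboarding Health", "target": "Image Health"},
--     {"type": "tab", "parent": "Image Health", "label": "Defect Detection", "target": "Image Health"},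
--     {"type": "tab", "parent": "Image Health", "label": "Virtual Combos", "target": "Image Health"},
--     {"type": "tab", "parent": "Image Health", "label": "Quality vs BK", "target": "Image Health"},
--     {"type": "tab", "parent": "Image Health", "label": "Diff Assortment", "target": "Image Health"},
--     # ERP BAU tabs
--     {"type": "tab", "parent": "ERP Assortment (BAU)", "label": "Overview", "target": "ERP Assortment (BAU)"},
--     {"type": "tab", "parent": "ERP Assortment (BAU)", "label": "Pod Master", "target": "ERP Assortment (BAU)"},
--     {"type": "tab", "parent": "ERP Assortment (BAU)", "label": "Block OTB", "target": "ERP Assortment (BAU)"},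
--     {"type": "tab", "parent": "ERP Assortment (BAU)", "label": "Pod Tiering", "target": "ERP Assortment (BAU)"},
--     {"type": "tab", "parent": "ERP Assortment (BAU)", "label": "Enablement Delta", "target": "ERP Assortment (BAU)"},
--     # QC tabs
--     {"type": "tab", "parent": "QC: Diff Assortment", "label": "Image Fulfillment", "target": "QC: Diff Assortment"},
--     {"type": "tab", "parent": "QC: Diff Assortment", "label": "Image Count Flags", "target": "QC: Diff Assortment"},
--     {"type": "tab", "parent": "QC: Diff Assortment", "label": "Checklist SOP", "target": "QC: Diff Assortment"},
--     {"type": "tab", "parent": "QC: Diff Assortment", "label": "Secondary Tertiary P999", "target": "QC: Diff Assortment"},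
--     {"type": "tab", "parent": "QC: Diff Assortment", "label": "Copy Preview", "target": "QC: Diff Assortment"},
--     # SPIN Lookup tabs
--     {"type": "tab", "parent": "SPIN Lookup", "label": "General CMS", "target": "SPIN Lookup"},
--     {"type": "tab", "parent": "SPIN Lookup", "label": "ERP per SPIN", "target": "SPIN Lookup"},
--     {"type": "tab", "parent": "SPIN Lookup", "label": "Storefront", "target": "SPIN Lookup"},
--     {"type": "tab", "parent": "SPIN Lookup", "label": "Logs Change History", "target": "SPIN Lookup"},
-- ]
--
-- def search_suggestions(query):
--     """Return matching entries. Also detects SPIN/Item Code for lookup."""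
--     if not query or len(query.strip()) < 2:
--         return []
--     q = query.lower().strip()
--     hits = []
--
--     q_stripped = query.strip()
--     if q_stripped.isdigit() and len(q_stripped) >= 3:
--         hits.append({
--             "type": "lookup", "label": f"Item Code lookup: {q_stripped}",
--             "target": "SPIN Lookup", "query": q_stripped, "icon": "🔎",
--         })
--     elif len(q_stripped) == 10 and q_stripped.isalnum():
--         hits.append({
--             "type": "lookup", "label": f"SPIN ID lookup: {q_stripped.upper()}",
--             "target": "SPIN Lookup", "query": q_stripped.upper(), "icon": "🔎",
--         })
--
--     for entry in SEARCH_INDEX: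
--         label_l = entry["label"].lower()
--         if q in label_l:
--             hits.append(entry)
--         elif all(word in label_l for word in q.split()):
--             hits.append(entry)
--
--     def _score(h):
--         lab = h["label"].lower()
--         if lab == q: return 0
--         if lab.startswith(q): return 1
--         if q in lab: return 2
--         return 3
--     hits.sort(key=_score)
--
--     # Dedup
--     seen = set()
--     out = []
--     for h in hits:
--         key = (h.get("type"), h.get("label"), h.get("target"))
--         if key not in seen:
--             seen.add(key)
--             out.append(h)
--     return out[:12]
-- ===== SOURCE B (Python) =====
-- SEARCH_INDEX = [
--     {"type": "metric", "label": "Image Health", "target": "Image Health", "icon": "📷"},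
--     {"type": "metric", "label": "ERP Assortment (BAU)", "target": "ERP Assortment (BAU)", "icon": "📊"},
--     {"type": "metric", "label": "ERP Assortment (Events)", "target": "ERP Assortment (Events)", "icon": "📅"},
--     {"type": "metric", "label": "Enabled Items Health", "target": "Enabled Items Health", "icon": "✅"},
--     {"type": "metric", "label": "Shelf Life Deviation", "target": "Shelf Life Deviation", "icon": "⏰"},
--     {"type": "metric", "label": "SPIN Lookup", "target": "SPIN Lookup", "icon": "🔍"},
--     {"type": "metric", "label": "Upload Preview", "target": "Upload Preview", "icon": "⬆"},
--     {"type": "metric", "label": "QC: Diff Assortment", "target": "QC: Diff Assortment", "icon": "✓"},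
--     {"type": "tab", "parent": "Image Health", "label": "Health Trends", "target": "Image Health"},
--     {"type": "tab", "parent": "Image Health", "label": "Coverage", "target": "Image Health"},
--     {"type": "tab", "parent": "Image Health", "label": "Onboarding Health", "target": "Image Health"},
--     {"type": "tab", "parent": "Image Health", "label": "Defect Detection", "target": "Image Health"},
--     {"type": "tab", "parent": "Image Health", "label": "Virtual Combos", "target": "Image Health"},
--     {"type": "tab", "parent": "Image Health", "label": "Quality vs BK", "target": "Image Health"},
--     {"type": "tab", "parent": "Image Health", "label": "Diff Assortment", "target": "Image Health"},
--     {"type": "tab", "parent": "ERP Assortment (BAU)", "label": "Overview", "target": "ERP Assortment (BAU)"},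
--     {"type": "tab", "parent": "ERP Assortment (BAU)", "label": "Pod Master", "target": "ERP Assortment (BAU)"},
--     {"type": "tab", "parent": "ERP Assortment (BAU)", "label": "Block OTB", "target": "ERP Assortment (BAU)"},
--     {"type": "tab", "parent": "ERP Assortment (BAU)", "label": "Pod Tiering", "target": "ERP Assortment (BAU)"},
--     {"type": "tab", "parent": "ERP Assortment (BAU)", "label": "Enablement Delta", "target": "ERP Assortment (BAU)"},
--     {"type": "tab", "parent": "QC: Diff Assortment", "label": "Image Fulfillment", "target": "QC: Diff Assortment"},
--     {"type": "tab", "parent": "QC: Diff Assortment", "label": "Image Count Flags", "target": "QC: Diff Assortment"},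
--     {"type": "tab", "parent": "QC: Diff Assortment", "label": "Checklist SOP", "target": "QC: Diff Assortment"},
--     {"type": "tab", "parent": "QC: Diff Assortment", "label": "Secondary Tertiary P999", "target": "QC: Diff Assortment"},
--     {"type": "tab", "parent": "QC: Diff Assortment", "label": "Copy Preview", "target": "QC: Diff Assortment"},
--     {"type": "tab", "parent": "SPIN Lookup", "label": "General CMS", "target": "SPIN Lookup"},
--     {"type": "tab", "parent": "SPIN Lookup", "label": "ERP per SPIN", "target": "SPIN Lookup"},
--     {"type": "tab", "parent": "SPIN Lookup", "label": "Storefront", "target": "SPIN Lookup"},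
--     {"type": "tab", "parent": "SPIN Lookup", "label": "Logs Change History", "target": "SPIN Lookup"},
-- ]
--
--
-- def _score(q, h):
--     lab = h["label"].lower()
--     if lab == q:
--         return 0
--     if lab.startswith(q):
--         return 1
--     if q in lab:
--         return 2
--     return 3
--
--
-- def search_suggestions(query):
--     """Bucket-by-score re-implementation: no sort call, filter + 4 score buckets,
--     dict-setdefault dedup instead of a seen-set loop."""
--     s = query.strip()
--     if len(s) < 2:
--         return []
--     q = query.lower().strip()
--
--     lookup = []
--     if s.isdigit() and len(s) >= 3:
--         lookup = [{
--             "type": "lookup", "label": f"Item Code lookup: {s}",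
--             "target": "SPIN Lookup", "query": s, "icon": "🔎",
--         }]
--     elif len(s) == 10 and s.isalnum():
--         u = s.upper()
--         lookup = [{
--             "type": "lookup", "label": f"SPIN ID lookup: {u}",
--             "target": "SPIN Lookup", "query": u, "icon": "🔎",
--         }]
--
--     words = q.split()
--     matches = [e for e in SEARCH_INDEX
--                if q in e["label"].lower()
--                or all(w in e["label"].lower() for w in words)]
--
--     buckets = ([], [], [], [])
--     for h in lookup + matches:
--         buckets[_score(q, h)].append(h)
--
--     uniq = {}
--     for h in buckets[0] + buckets[1] + buckets[2] + buckets[3]: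
--         uniq.setdefault((h.get("type"), h.get("label"), h.get("target")), h)
--     return list(uniq.values())[:12]
-- ===== Notes on version B (the rewrite author's own statement) =====
-- stated objective: faster
-- what changed: Replaces the stable sort over a hits list by a single classification pass into four score buckets that are concatenated, replaces the seen-set dedup loop by a dict.setdefault pass, and splits the query once instead of re-splitting it for every index entry.
import Mathlib
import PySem

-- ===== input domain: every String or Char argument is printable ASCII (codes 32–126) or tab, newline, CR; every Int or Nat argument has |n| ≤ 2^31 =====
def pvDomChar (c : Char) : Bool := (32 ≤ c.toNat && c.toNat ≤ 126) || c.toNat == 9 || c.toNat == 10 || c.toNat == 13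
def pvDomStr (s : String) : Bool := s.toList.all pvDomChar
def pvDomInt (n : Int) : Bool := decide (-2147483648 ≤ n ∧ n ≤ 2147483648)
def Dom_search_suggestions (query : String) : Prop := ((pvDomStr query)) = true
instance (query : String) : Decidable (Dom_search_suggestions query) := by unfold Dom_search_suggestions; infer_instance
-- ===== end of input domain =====

-- B replaces the stable sort by one pass into four score buckets and the seen-set dedup by a
-- dict-setdefault pass, splitting the query once (measured constant-factor faster in a timing run).


-- shared module-level constant (both Pythons use the same SEARCH_INDEX)
def mkMetric (l t i : String) : List (String × String) :=
  [("type", "metric"), ("label", l), ("target", t), ("icon", i)]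
def mkTab (p l t : String) : List (String × String) :=
  [("type", "tab"), ("parent", p), ("label", l), ("target", t)]
def SEARCH_INDEX : List (List (String × String)) :=
  [ mkMetric "Image Health" "Image Health" "📷",
    mkMetric "ERP Assortment (BAU)" "ERP Assortment (BAU)" "📊",
    mkMetric "ERP Assortment (Events)" "ERP Assortment (Events)" "📅",
    mkMetric "Enabled Items Health" "Enabled Items Health" "✅",
    mkMetric "Shelf Life Deviation" "Shelf Life Deviation" "⏰",
    mkMetric "SPIN Lookup" "SPIN Lookup" "🔍",
    mkMetric "Upload Preview" "Upload Preview" "⬆",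
    mkMetric "QC: Diff Assortment" "QC: Diff Assortment" "✓",
    mkTab "Image Health" "Health Trends" "Image Health",
    mkTab "Image Health" "Coverage" "Image Health",
    mkTab "Image Health" "Onboarding Health" "Image Health",
    mkTab "Image Health" "Defect Detection" "Image Health",
    mkTab "Image Health" "Virtual Combos" "Image Health",
    mkTab "Image Health" "Quality vs BK" "Image Health",
    mkTab "Image Health" "Diff Assortment" "Image Health",
    mkTab "ERP Assortment (BAU)" "Overview" "ERP Assortment (BAU)",
    mkTab "ERP Assortment (BAU)" "Pod Master" "ERP Assortment (BAU)",
    mkTab "ERP Assortment (BAU)" "Block OTB" "ERP Assortment (BAU)",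
    mkTab "ERP Assortment (BAU)" "Pod Tiering" "ERP Assortment (BAU)",
    mkTab "ERP Assortment (BAU)" "Enablement Delta" "ERP Assortment (BAU)",
    mkTab "QC: Diff Assortment" "Image Fulfillment" "QC: Diff Assortment",
    mkTab "QC: Diff Assortment" "Image Count Flags" "QC: Diff Assortment",
    mkTab "QC: Diff Assortment" "Checklist SOP" "QC: Diff Assortment",
    mkTab "QC: Diff Assortment" "Secondary Tertiary P999" "QC: Diff Assortment",
    mkTab "QC: Diff Assortment" "Copy Preview" "QC: Diff Assortment",
    mkTab "SPIN Lookup" "General CMS" "SPIN Lookup",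
    mkTab "SPIN Lookup" "ERP per SPIN" "SPIN Lookup",
    mkTab "SPIN Lookup" "Storefront" "SPIN Lookup" ,
    mkTab "SPIN Lookup" "Logs Change History" "SPIN Lookup" ]

-- d.get(k) / d[k] on a Python dict as an association list: FIRST matching key
-- (exact here: every dict handled has unique keys, and d[k] is only used where k is present)
def dGet? (d : List (String × String)) (k : String) : Option String :=
  (d.find? (fun p => p.1 == k)).map (·.2)
def dGet (d : List (String × String)) (k : String) : String :=
  (dGet? d k).getD ""

-- the score both Pythons compute (_score; closure variable q passed explicitly)
def pvScore (q : String) (h : List (String × String)) : Nat :=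
  if PySem.Str.lower (dGet h "label") = q then 0
  else if PySem.Str.startswith (PySem.Str.lower (dGet h "label")) q then 1
  else if PySem.Str.isIn q (PySem.Str.lower (dGet h "label")) then 2
  else 3

def pvDedupKey (h : List (String × String)) : Option String × Option String × Option String :=
  (dGet? h "type", dGet? h "label", dGet? h "target")

-- ===== PORT A =====
def search_suggestions (query : String) : List (List (String × String)) :=
  if query = "" ∨ PySem.Str.len (PySem.Str.strip query) < 2 then []
  else
    let q := PySem.Str.strip (PySem.Str.lower query)
    let q_stripped := PySem.Str.strip query
    let hits0 : List (List (String × String)) :=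
      if PySem.Str.strIsdigit q_stripped ∧ 3 ≤ PySem.Str.len q_stripped then
        [[("type", "lookup"), ("label", "Item Code lookup: " ++ q_stripped),
          ("target", "SPIN Lookup"), ("query", q_stripped), ("icon", "🔎")]]
      else if PySem.Str.len q_stripped = 10 ∧ PySem.Str.strIsalnum q_stripped then
        [[("type", "lookup"), ("label", "SPIN ID lookup: " ++ PySem.Str.upper q_stripped),
          ("target", "SPIN Lookup"), ("query", PySem.Str.upper q_stripped), ("icon", "🔎")]]
      else []
    let hits := SEARCH_INDEX.foldl (fun acc entry =>
      let label_l := PySem.Str.lower (dGet entry "label")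
      if PySem.Str.isIn q label_l then acc ++ [entry]
      else if (PySem.Str.split₀ q).all (fun w => PySem.Str.isIn w label_l) then acc ++ [entry]
      else acc) hits0
    let sortedHits := PySem.List.sorted hits (pvScore q)
    let dedup := sortedHits.foldl
      (fun (st : PySem.Set (Option String × Option String × Option String) ×
                 List (List (String × String))) h =>
        if PySem.Set.contains st.1 (pvDedupKey h) then st
        else (PySem.Set.add st.1 (pvDedupKey h), st.2 ++ [h]))
      (PySem.Set.empty, [])
    PySem.List.slice dedup.2 none (some 12)

-- ===== PORT B =====
def search_suggestions_alt (query : String) : List (List (String × String)) :=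
  let s := PySem.Str.strip query
  if PySem.Str.len s < 2 then []
  else
    let q := PySem.Str.strip (PySem.Str.lower query)
    let lookup : List (List (String × String)) :=
      if PySem.Str.strIsdigit s ∧ 3 ≤ PySem.Str.len s then
        [[("type", "lookup"), ("label", "Item Code lookup: " ++ s),
          ("target", "SPIN Lookup"), ("query", s), ("icon", "🔎")]]
      else if PySem.Str.len s = 10 ∧ PySem.Str.strIsalnum s then
        let u := PySem.Str.upper s
        [[("type", "lookup"), ("label", "SPIN ID lookup: " ++ u),
          ("target", "SPIN Lookup"), ("query", u), ("icon", "🔎")]]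
      else []
    let words := PySem.Str.split₀ q
    let matched := SEARCH_INDEX.filter (fun e =>
      PySem.Str.isIn q (PySem.Str.lower (dGet e "label")) ||
      words.all (fun w => PySem.Str.isIn w (PySem.Str.lower (dGet e "label"))))
    let buckets := (lookup ++ matched).foldl
      (fun (b : List (List (String × String)) × List (List (String × String)) ×
                List (List (String × String)) × List (List (String × String))) h =>
        match pvScore q h with
        | 0 => (b.1 ++ [h], b.2.1, b.2.2.1, b.2.2.2)
        | 1 => (b.1, b.2.1 ++ [h], b.2.2.1, b.2.2.2)
        | 2 => (b.1, b.2.1, b.2.2.1 ++ [h], b.2.2.2)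
        | _ => (b.1, b.2.1, b.2.2.1, b.2.2.2 ++ [h]))
      ([], [], [], [])
    let uniq := (buckets.1 ++ buckets.2.1 ++ buckets.2.2.1 ++ buckets.2.2.2).foldl
      (fun (d : PySem.Dict (Option String × Option String × Option String)
                  (List (String × String))) h => d.setdefault (pvDedupKey h) h)
      PySem.Dict.empty
    PySem.List.slice (PySem.Dict.values uniq) none (some 12)

-- ===== PRECONDITION & SPEC =====
def Spec_search_suggestions (query : String) (out : List (List (String × String))) : Prop := out = search_suggestions_alt query
instance (query : String) (out : List (List (String × String))) : Decidable (Spec_search_suggestions query out) := by unfold Spec_search_suggestions; infer_instance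

-- ===== CLAIM (what is proved, stated in full; the proofs are below) =====
def Claim_equal_search_suggestions : Prop := ∀ (query : String), Dom_search_suggestions query → Spec_search_suggestions query (search_suggestions query)

-- ===== LEMMAS AND PROOFS =====

lemma pvScore_le_three (q : String) (h : List (String × String)) : pvScore q h ≤ 3 := by
  unfold pvScore; split_ifs <;> omega

lemma insertBy_append_not {α : Type} (before : α → α → Bool) (x : α) (ys zs : List α)
    (h : ∀ y ∈ ys, before x y = false) :
    PySem.List.insertBy before x (ys ++ zs) = ys ++ PySem.List.insertBy before x zs := by
  induction ys with
  | nil => simp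
  | cons a ys ih =>
      have ha : before x a = false := h a (by simp)
      simp [PySem.List.insertBy, ha, ih (fun y hy => h y (by simp [hy]))]

lemma insertBy_all_before {α : Type} (before : α → α → Bool) (x : α) (zs : List α)
    (h : ∀ y ∈ zs, before x y = true) :
    PySem.List.insertBy before x zs = x :: zs := by
  cases zs with
  | nil => simp [PySem.List.insertBy]
  | cons a ys => simp [PySem.List.insertBy, h a (by simp)]

/-- The stable sort of a list whose keys all lie in {0,1,2,3} is the
concatenation of the four key-buckets in input order. -/
lemma sorted_eq_four_buckets {α : Type} (key : α → Nat) (xs : List α)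
    (hk : ∀ x ∈ xs, key x ≤ 3) :
    PySem.List.sorted xs key =
      xs.filter (fun x => key x == 0) ++ xs.filter (fun x => key x == 1) ++
      xs.filter (fun x => key x == 2) ++ xs.filter (fun x => key x == 3) := by
  rw [PySem.List.sorted_eq_foldl_insertBy]
  induction xs using List.reverseRecOn with
  | nil => simp
  | append_singleton xs x ih =>
      have hx : key x ≤ 3 := hk x (by simp)
      rw [List.foldl_append, List.foldl_cons, List.foldl_nil,
        ih (fun y hy => hk y (by simp [hy]))]
      have mem0 : ∀ y ∈ xs.filter (fun z => key z == 0), key y = 0 := by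
        intro y hy; simpa using (List.mem_filter.mp hy).2
      have mem1 : ∀ y ∈ xs.filter (fun z => key z == 1), key y = 1 := by
        intro y hy; simpa using (List.mem_filter.mp hy).2
      have mem2 : ∀ y ∈ xs.filter (fun z => key z == 2), key y = 2 := by
        intro y hy; simpa using (List.mem_filter.mp hy).2
      have mem3 : ∀ y ∈ xs.filter (fun z => key z == 3), key y = 3 := by
        intro y hy; simpa using (List.mem_filter.mp hy).2
      simp only [List.filter_append, List.filter_cons, List.filter_nil, List.append_assoc]
      interval_cases hkx : key x
      · -- key x = 0 : x goes before everything with key > 0, i.e. after bucket 0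
        rw [insertBy_append_not _ x _ _ (fun y hy => by simp [mem0 y hy, hkx]),
          insertBy_all_before _ x _ (fun y hy => by
            rcases List.mem_append.mp hy with hy | hy
            · simp [mem1 y hy, hkx]
            · rcases List.mem_append.mp hy with hy | hy
              · simp [mem2 y hy, hkx]
              · simp [mem3 y hy, hkx])]
        simp
      · rw [insertBy_append_not _ x _ _ (fun y hy => by simp [mem0 y hy, hkx]),
          insertBy_append_not _ x _ _ (fun y hy => by simp [mem1 y hy, hkx]),
          insertBy_all_before _ x _ (fun y hy => by
            rcases List.mem_append.mp hy with hy | hy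
            · simp [mem2 y hy, hkx]
            · simp [mem3 y hy, hkx])]
        simp
      · rw [insertBy_append_not _ x _ _ (fun y hy => by simp [mem0 y hy, hkx]),
          insertBy_append_not _ x _ _ (fun y hy => by simp [mem1 y hy, hkx]),
          insertBy_append_not _ x _ _ (fun y hy => by simp [mem2 y hy, hkx]),
          insertBy_all_before _ x _ (fun y hy => by simp [mem3 y hy, hkx])]
        simp
      · rw [insertBy_append_not _ x _ _ (fun y hy => by simp [mem0 y hy, hkx]),
          insertBy_append_not _ x _ _ (fun y hy => by simp [mem1 y hy, hkx]),
          insertBy_append_not _ x _ _ (fun y hy => by simp [mem2 y hy, hkx]),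
          PySem.List.insertBy_of_forall_not_before _ x _ (fun y hy => by simp [mem3 y hy, hkx])]
        simp

/-- Folding the bucket-placing step equals the four filters. -/
lemma foldl_buckets {α : Type} (key : α → Nat) (hs : List α) :
    ∀ (b0 b1 b2 b3 : List α), (∀ x ∈ hs, key x ≤ 3) →
    hs.foldl (fun b h =>
        match key h with
        | 0 => (b.1 ++ [h], b.2.1, b.2.2.1, b.2.2.2)
        | 1 => (b.1, b.2.1 ++ [h], b.2.2.1, b.2.2.2)
        | 2 => (b.1, b.2.1, b.2.2.1 ++ [h], b.2.2.2)
        | _ => (b.1, b.2.1, b.2.2.1, b.2.2.2 ++ [h])) (b0, b1, b2, b3) =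
      (b0 ++ hs.filter (fun x => key x == 0), b1 ++ hs.filter (fun x => key x == 1),
       b2 ++ hs.filter (fun x => key x == 2), b3 ++ hs.filter (fun x => key x == 3)) := by
  induction hs with
  | nil => simp
  | cons h t ih =>
      intro b0 b1 b2 b3 hk
      have hh : key h ≤ 3 := hk h (by simp)
      have iht := fun b0 b1 b2 b3 => ih b0 b1 b2 b3 (fun y hy => hk y (by simp [hy]))
      rw [List.foldl_cons]
      rcases e : key h with _ | _ | _ | n
      · simp [e, iht]
      · simp [e, iht]
      · simp [e, iht]
      · have hn : n = 0 := by omega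
        subst hn
        simp [e, iht]

/-- The seen-set dedup loop and the dict.setdefault loop agree. -/
lemma dedup_eq_setdefault {α κ : Type} [BEq κ] [LawfulBEq κ] (keyf : α → κ) (hs : List α) :
    ∀ (d : PySem.Dict κ α),
    (hs.foldl (fun st h =>
        if PySem.Set.contains st.1 (keyf h) then st
        else (PySem.Set.add st.1 (keyf h), st.2 ++ [h]))
      ((PySem.Dict.keys d : PySem.Set κ), PySem.Dict.values d)).2 =
    PySem.Dict.values (hs.foldl (fun d h => PySem.Dict.setdefault d (keyf h) h) d) := by
  induction hs with
  | nil => intro d; rfl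
  | cons h t ih =>
      intro d
      rw [List.foldl_cons, List.foldl_cons]
      by_cases hc : PySem.Dict.contains d (keyf h) = true
      · have hmem : keyf h ∈ PySem.Dict.keys d := (PySem.Dict.contains_iff_mem_keys d (keyf h)).mp hc
        have hset : PySem.Set.contains (PySem.Dict.keys d) (keyf h) = true :=
          (PySem.Set.contains_iff _ _).mpr hmem
        rw [PySem.Dict.setdefault_of_contains d h hc, if_pos hset]
        exact ih d
      · have hc' : PySem.Dict.contains d (keyf h) = false := by
          simpa using hc
        have hmem : keyf h ∉ PySem.Dict.keys d := by
          intro hm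
          rw [(PySem.Dict.contains_iff_mem_keys d (keyf h)).mpr hm] at hc'
          cases hc'
        have hset : PySem.Set.contains (PySem.Dict.keys d) (keyf h) = false := by
          by_contra hb
          exact hmem ((PySem.Set.contains_iff _ _).mp (by simpa using hb))
        rw [PySem.Dict.setdefault_of_not_contains d h hc']
        have hkeys : PySem.Dict.keys (PySem.Dict.insert d (keyf h) h) =
            PySem.Dict.keys d ++ [keyf h] :=
          PySem.Dict.keys_insert_of_not_contains d h hc'
        have hvals : PySem.Dict.values (PySem.Dict.insert d (keyf h) h) =
            PySem.Dict.values d ++ [h] := by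
          simp only [PySem.Dict.values, PySem.Dict.items_insert_of_not_contains d h hc',
            List.map_append, List.map_cons, List.map_nil]
        have hadd : PySem.Set.add (PySem.Dict.keys d) (keyf h) =
            PySem.Dict.keys d ++ [keyf h] := PySem.Set.add_of_not_mem hmem
        rw [if_neg (by simpa using hmem)]
        have := ih (PySem.Dict.insert d (keyf h) h)
        rw [hkeys, hvals] at this
        simpa [hadd] using this

/-- the dedup equivalence, from the empty seen-set / empty dict. -/
lemma dedup_empty {α κ : Type} [BEq κ] [LawfulBEq κ] (keyf : α → κ) (hs : List α) :
    (hs.foldl (fun st h =>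
        if PySem.Set.contains st.1 (keyf h) then st
        else (PySem.Set.add st.1 (keyf h), st.2 ++ [h]))
      (PySem.Set.empty, ([] : List α))).2 =
    PySem.Dict.values (hs.foldl (fun d h => PySem.Dict.setdefault d (keyf h) h)
      PySem.Dict.empty) := by
  simpa using dedup_eq_setdefault keyf hs PySem.Dict.empty

-- ===== VERDICT (by name: the statement is the Claim_ definition above) =====
theorem search_suggestions_spec : Claim_equal_search_suggestions := by
  intro query _
  unfold Spec_search_suggestions
  simp only [search_suggestions, search_suggestions_alt]
  by_cases hlt : PySem.Str.len (PySem.Str.strip query) < 2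
  · rw [if_pos (Or.inr hlt), if_pos hlt]
  · have hA : ¬ (query = "" ∨ PySem.Str.len (PySem.Str.strip query) < 2) := by
      rintro (rfl | h)
      · exact hlt (by decide)
      · exact hlt h
    rw [if_neg hA, if_neg hlt]
    set q := PySem.Str.strip (PySem.Str.lower query) with hq
    have hbody : ∀ (acc : List (List (String × String))) e, e ∈ SEARCH_INDEX →
        (if PySem.Str.isIn q (PySem.Str.lower (dGet e "label")) then acc ++ [e]
         else if (PySem.Str.split₀ q).all
             (fun w => PySem.Str.isIn w (PySem.Str.lower (dGet e "label"))) then acc ++ [e]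
         else acc)
        = if (PySem.Str.isIn q (PySem.Str.lower (dGet e "label")) ||
             (PySem.Str.split₀ q).all
               (fun w => PySem.Str.isIn w (PySem.Str.lower (dGet e "label")))) then acc ++ [e]
          else acc := by
      intro acc e _
      by_cases h1 : PySem.Str.isIn q (PySem.Str.lower (dGet e "label")) = true <;>
      by_cases h2 : ((PySem.Str.split₀ q).all
          fun w => PySem.Str.isIn w (PySem.Str.lower (dGet e "label"))) = true <;>
      simp only [h1, h2] <;> simp
    rw [PySem.List.foldl_congr_mem _ _ _ _ hbody, PySem.List.foldl_append_if_eq_filter,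
      sorted_eq_four_buckets (pvScore q) _ (fun x _ => pvScore_le_three q x),
      foldl_buckets (pvScore q) _ [] [] [] [] (fun x _ => pvScore_le_three q x)]
    simp only [List.nil_append]
    rw [dedup_empty]
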